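-- pv_equiv track=rewrite | github.com/PepperLola/lights | scripts/migrate_effects.py | python_to_java_type
-- ===== SOURCE A (Python) =====
-- def python_to_java_type(s: str, assume_array = False) -> str:
--     types_dict: dict[str, str] = {
--         "str": "String",
--         "int": "int",
--         "float": "double",
--         "bool": "boolean",
--         "LEDEffect": "Effect",
--         "LEDSegment": "LEDSegment",
--         "ColorRamp": "ColorRamp",
--         "Color": "Color",
--     }
--     if s in types_dict.keys():
--         return types_dict[s]
--     # figure out lists and stuff
--     if "list" in s:
--         if not "[" in s:
--             raise Exception("Need to define type of list")
--         first_index = s.index("[")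
--         last_index = s.rfind("]")
--         inner = s[first_index+1:last_index]
--         if "list" in inner:
--             s = python_to_java_type(inner, True) + "[]"
--         elif assume_array:
--             return python_to_java_type(inner, True) + "[]"
--         else:
--             s = f"List<{python_to_java_type(inner)}>"
--         return s
--     return ""
-- ===== SOURCE B (Python) =====
-- def python_to_java_type(s: str, assume_array = False) -> str:
--     types_dict: dict[str, str] = {
--         "str": "String",
--         "int": "int",
--         "float": "double",
--         "bool": "boolean",
--         "LEDEffect": "Effect",
--         "LEDSegment": "LEDSegment",
--         "ColorRamp": "ColorRamp",
--         "Color": "Color",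
--     }
--     direct = types_dict.get(s)
--     if direct is not None:
--         return direct
--     if "list" not in s:
--         return ""
--     # iteratively peel one bracket layer per "list" level, counting the depth
--     cur = s
--     depth = 0
--     while "list" in cur:
--         start = cur.find("[")
--         if start < 0:
--             raise Exception("Need to define type of list")
--         cur = cur[start + 1 : cur.rfind("]")]
--         depth += 1
--     base = types_dict.get(cur, "")
--     if depth == 1 and not assume_array:
--         return "List<" + base + ">"
--     return base + "[]" * depth
-- ===== Notes on version B (the rewrite author's own statement) =====
-- stated objective: simpler
-- what changed: Replaces A's self-recursion (which re-enters the dict check at every nesting level and assembles the result on the way back out of the call stack) with a single iterative peeling loop that counts the nesting depth, followed by one dict lookup for the base type and a closed-form assembly: the generic List wrapper when the depth is 1 and assume_array is false, otherwise the base type followed by depth pairs of square brackets.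
import Mathlib
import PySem

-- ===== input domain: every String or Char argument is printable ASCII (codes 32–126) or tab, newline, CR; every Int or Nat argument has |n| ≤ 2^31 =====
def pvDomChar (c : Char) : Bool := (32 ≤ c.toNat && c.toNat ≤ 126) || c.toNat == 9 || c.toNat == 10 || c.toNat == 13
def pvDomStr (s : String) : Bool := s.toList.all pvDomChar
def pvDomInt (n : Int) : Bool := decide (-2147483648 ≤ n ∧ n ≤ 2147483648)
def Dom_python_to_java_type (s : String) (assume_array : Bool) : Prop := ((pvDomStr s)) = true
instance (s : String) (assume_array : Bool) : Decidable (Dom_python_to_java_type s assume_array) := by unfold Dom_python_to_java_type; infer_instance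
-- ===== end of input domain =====

-- B replaces A's self-recursion by one iterative peeling loop counting the nesting depth plus a
-- closed-form assembly of the result; equivalence is proved on Pre_ (exactly the non-raising inputs).

-- termination fact both loops need: peeling the bracketed inner substring strictly shrinks the string
theorem pv_peel_len_lt (cs : List Char) (h : PySem.Chars.isIn "[".toList cs = true) :
    (PySem.Chars.slice cs (some (PySem.Chars.find cs "[".toList + 1))
      (some (PySem.Chars.rfind cs "]".toList))).length < cs.length := by
  have hinf := (PySem.Chars.isIn_iff_infix _ _).1 h
  have hf : 0 ≤ PySem.Chars.find cs "[".toList := by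
    rw [PySem.Chars.find_nonneg_iff]; exact hinf
  have hne : 0 < cs.length := by
    rcases hinf with ⟨p, q, hpq⟩
    have hle : ("[".toList).length ≤ cs.length := by
      rw [← hpq]; simp; omega
    simpa using lt_of_lt_of_le (by decide : 0 < ("[".toList).length) hle
  rw [PySem.Chars.slice_eq_listSlice, PySem.List.length_slice]
  have h1 : 1 ≤ PySem.List.clampIdx cs.length (PySem.Chars.find cs "[".toList + 1) := by
    have hcast : PySem.Chars.find cs "[".toList + 1
        = (((PySem.Chars.find cs "[".toList).toNat + 1 : Nat) : Int) := by omega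
    rw [hcast, PySem.List.clampIdx_natCast]; omega
  have h2 : PySem.List.clampIdx cs.length (PySem.Chars.rfind cs "]".toList) ≤ cs.length :=
    PySem.List.clampIdx_le _ _
  omega

-- the same fact phrased for B's loop, which works on String via the PySem.Str primitives
theorem pv_peel_len_lt_str (s : String) (h : PySem.Str.isIn "[" s = true) :
    (PySem.Str.slice s (some (PySem.Str.find s "[" + 1))
      (some (PySem.Str.rfind s "]"))).toList.length < s.toList.length := by
  have := pv_peel_len_lt s.toList (by simpa using h)
  simpa using this

-- ===== PORT A =====
-- literal transliteration of A's recursion; on Python's `raise Exception("Need to define type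
-- of list")` path (s contains "list" but no "[") the port returns [] — excluded by Pre_.
def pvTypesDict : PySem.Dict (List Char) (List Char) :=
  PySem.Dict.ofList
    [("str".toList, "String".toList),
     ("int".toList, "int".toList),
     ("float".toList, "double".toList),
     ("bool".toList, "boolean".toList),
     ("LEDEffect".toList, "Effect".toList),
     ("LEDSegment".toList, "LEDSegment".toList),
     ("ColorRamp".toList, "ColorRamp".toList),
     ("Color".toList, "Color".toList)]

def pyAux (cs : List Char) (assumeArray : Bool) : List Char :=
  match PySem.Dict.get? pvTypesDict cs with
  | some v => v
  | none =>
    if PySem.Chars.isIn "list".toList cs then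
      if !(PySem.Chars.isIn "[".toList cs) then []  -- raise Exception("Need to define type of list")
      else
        let firstIndex := PySem.Chars.find cs "[".toList
        let lastIndex := PySem.Chars.rfind cs "]".toList
        let inner := PySem.Chars.slice cs (some (firstIndex + 1)) (some lastIndex)
        if PySem.Chars.isIn "list".toList inner then
          pyAux inner true ++ "[]".toList
        else if assumeArray then
          pyAux inner true ++ "[]".toList
        else
          "List<".toList ++ pyAux inner false ++ ">".toList
    else []
termination_by cs.length
decreasing_by all_goals (apply pv_peel_len_lt; simp_all)

def python_to_java_type (s : String) (assume_array : Bool) : String :=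
  String.ofList (pyAux s.toList assume_array)

-- ===== PORT B =====
-- transliteration of Source B: a dict over String, the while-loop `altPeel` peeling one bracket layer
-- per "list" level while counting the depth, then one lookup and a closed-form assembly.
def altDict : PySem.Dict String String :=
  PySem.Dict.ofList
    [("str", "String"),
     ("int", "int"),
     ("float", "double"),
     ("bool", "boolean"),
     ("LEDEffect", "Effect"),
     ("LEDSegment", "LEDSegment"),
     ("ColorRamp", "ColorRamp"),
     ("Color", "Color")]

def altPeel (cur : String) (depth : Nat) : String × Nat :=
  if PySem.Str.isIn "list" cur then
    let start := PySem.Str.find cur "["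
    if start < 0 then (cur, depth)  -- raise Exception("Need to define type of list")
    else
      altPeel (PySem.Str.slice cur (some (start + 1)) (some (PySem.Str.rfind cur "]"))) (depth + 1)
  else (cur, depth)
termination_by cur.toList.length
decreasing_by
  apply pv_peel_len_lt_str
  rw [PySem.Str.isIn_iff_infix]
  exact (PySem.Str.find_nonneg_iff _ _).1 (by omega)

def altRepeat : Nat → String  -- "[]" * depth
  | 0 => ""
  | n + 1 => "[]" ++ altRepeat n

def python_to_java_type_alt (s : String) (assume_array : Bool) : String :=
  match PySem.Dict.get? altDict s with
  | some direct => direct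
  | none =>
    if !(PySem.Str.isIn "list" s) then ""
    else
      let p := altPeel s 0
      let base := PySem.Dict.getD altDict p.1 ""
      if p.2 == 1 && !assume_array then "List<" ++ base ++ ">"
      else base ++ altRepeat p.2

-- ===== PRECONDITION & SPEC =====
-- the fully bracket-peeled core of a string: peel s[index('[')+1 : rfind(']')] while a '[' remains;
-- each peel strictly shortens the string (pv_peel_len_lt), so cs.length steps always finish the
-- peeling — the structural counter is a length bound, never an assumption on the input
def pvCoreGo : Nat → List Char → List Char
  | 0, cs => cs
  | n + 1, cs =>
    if PySem.Chars.isIn "[".toList cs then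
      pvCoreGo n (PySem.Chars.slice cs (some (PySem.Chars.find cs "[".toList + 1))
        (some (PySem.Chars.rfind cs "]".toList)))
    else cs

def pvCore (cs : List Char) : List Char := pvCoreGo cs.length cs

-- Pre_ excludes EXACTLY the inputs on which A raises its exception: the strings whose fully
-- bracket-peeled core still contains "list"; A returns on everything else (coverage is exact).
-- The raise set is inherently about the input's nested bracket structure, so the reader checks it
-- by peeling brackets (pvCore above) — pvCore inspects only brackets, never the dict or A's result.
def Pre_python_to_java_type (s : String) (assume_array : Bool) : Prop :=
  PySem.Chars.isIn "list".toList (pvCore s.toList) = false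
instance (s : String) (assume_array : Bool) : Decidable (Pre_python_to_java_type s assume_array) := by
  unfold Pre_python_to_java_type; infer_instance

def pvWitness_python_to_java_type : String × Bool := ("list[list[int]]", false)

def Spec_python_to_java_type (s : String) (assume_array : Bool) (out : String) : Prop := out = python_to_java_type_alt s assume_array
instance (s : String) (assume_array : Bool) (out : String) : Decidable (Spec_python_to_java_type s assume_array out) := by unfold Spec_python_to_java_type; infer_instance

-- ===== CLAIM =====
def Claim_equal_python_to_java_type : Prop := ∀ (s : String) (assume_array : Bool), Dom_python_to_java_type s assume_array → Pre_python_to_java_type s assume_array → Spec_python_to_java_type s assume_array (python_to_java_type s assume_array)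

-- ===== LEMMAS AND PROOFS =====

-- proof-only abbreviation for the peeled inner substring s[s.index("[")+1 : s.rfind("]")]
def pvInner (cs : List Char) : List Char :=
  PySem.Chars.slice cs (some (PySem.Chars.find cs "[".toList + 1))
    (some (PySem.Chars.rfind cs "]".toList))

theorem pv_types_mk : pvTypesDict = PySem.Dict.mk
    [("str".toList, "String".toList),
     ("int".toList, "int".toList),
     ("float".toList, "double".toList),
     ("bool".toList, "boolean".toList),
     ("LEDEffect".toList, "Effect".toList),
     ("LEDSegment".toList, "LEDSegment".toList),
     ("ColorRamp".toList, "ColorRamp".toList),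
     ("Color".toList, "Color".toList)] := by decide

theorem pv_alt_mk : altDict = PySem.Dict.mk
    [("str", "String"),
     ("int", "int"),
     ("float", "double"),
     ("bool", "boolean"),
     ("LEDEffect", "Effect"),
     ("LEDSegment", "LEDSegment"),
     ("ColorRamp", "ColorRamp"),
     ("Color", "Color")] := by decide

-- the two dict literals agree through .toList
theorem pv_get?_bridge (s : String) :
    PySem.Dict.get? pvTypesDict s.toList = Option.map String.toList (PySem.Dict.get? altDict s) := by
  have hbeq : ∀ (k : String), (k.toList == s.toList) = (k == s) := by
    intro k
    cases h : k == s
    · simp only [beq_eq_false_iff_ne, ne_eq] at h ⊢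
      exact fun hh => h (String.toList_inj.mp hh)
    · simp only [beq_iff_eq] at h; subst h; simp
  rw [pv_types_mk, pv_alt_mk]
  repeat rw [PySem.Dict.get?_mk_cons]
  simp only [hbeq]
  repeat' split_ifs
  all_goals rfl

theorem pv_getD_bridge (s : String) :
    PySem.Dict.getD pvTypesDict s.toList [] = (PySem.Dict.getD altDict s "").toList := by
  rw [PySem.Dict.getD_eq_get?_getD, PySem.Dict.getD_eq_get?_getD, pv_get?_bridge]
  cases PySem.Dict.get? altDict s <;> simp

-- no key of types_dict contains "list", so a string containing "list" misses the dict
theorem pv_get?_none_of_list {cs : List Char}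
    (h : PySem.Chars.isIn "list".toList cs = true) :
    PySem.Dict.get? pvTypesDict cs = none := by
  rw [pv_types_mk]
  repeat rw [PySem.Dict.get?_mk_cons]
  split_ifs
  all_goals first
  | rfl
  | (rename_i hk; rw [← (beq_iff_eq).1 hk] at h; exact absurd h (by decide))

-- base case of A's recursion: no "list" ⇒ dict lookup with default ""
theorem pyAux_no_list {cs : List Char} (a : Bool)
    (h : PySem.Chars.isIn "list".toList cs = false) :
    pyAux cs a = PySem.Dict.getD pvTypesDict cs [] := by
  rw [pyAux.eq_def]
  cases hd : PySem.Dict.get? pvTypesDict cs with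
  | some v => simp [PySem.Dict.getD_eq_get?_getD, hd]
  | none => simp_all [PySem.Dict.getD_eq_get?_getD]

-- one unfolding of A's recursion on the recursive path
theorem pyAux_step {cs : List Char} (a : Bool)
    (hl : PySem.Chars.isIn "list".toList cs = true)
    (hb : PySem.Chars.isIn "[".toList cs = true) :
    pyAux cs a =
      if PySem.Chars.isIn "list".toList (pvInner cs) then
        pyAux (pvInner cs) true ++ "[]".toList
      else if a then
        pyAux (pvInner cs) true ++ "[]".toList
      else
        "List<".toList ++ pyAux (pvInner cs) false ++ ">".toList := by
  rw [pyAux.eq_def, pv_get?_none_of_list hl]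
  simp_all [pvInner]

-- any fuel at least cs.length computes the same core
theorem pvCoreGo_fuel : ∀ (n : Nat) (cs : List Char), cs.length ≤ n →
    pvCoreGo n cs = pvCore cs := by
  intro n
  induction n using Nat.strong_induction_on with
  | _ n ih =>
    intro cs hlen
    match n, hlen with
    | 0, hlen =>
      have h0 : cs.length = 0 := by omega
      rw [pvCore, h0]
    | Nat.succ n, hlen =>
      by_cases hb : PySem.Chars.isIn "[".toList cs = true
      · have hlt := pv_peel_len_lt cs hb
        obtain ⟨m, hm⟩ : ∃ m, cs.length = m + 1 := ⟨cs.length - 1, by omega⟩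
        rw [pvCore, hm, pvCoreGo, pvCoreGo, if_pos hb, if_pos hb,
          ih n (by omega) _ (by omega), ih m (by omega) _ (by omega)]
      · rw [pvCore]
        cases hcs : cs.length with
        | zero => rw [pvCoreGo, pvCoreGo, if_neg hb]
        | succ m => rw [pvCoreGo, pvCoreGo, if_neg hb, if_neg hb]

theorem pvCore_stop {cs : List Char} (h : PySem.Chars.isIn "[".toList cs = false) :
    pvCore cs = cs := by
  rw [pvCore]
  cases hcs : cs.length with
  | zero => rw [pvCoreGo]
  | succ m => rw [pvCoreGo, if_neg (by simp only [h]; simp)]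

theorem pvCore_step {cs : List Char} (h : PySem.Chars.isIn "[".toList cs = true) :
    pvCore cs = pvCore (pvInner cs) := by
  have hlt := pv_peel_len_lt cs h
  obtain ⟨m, hm⟩ : ∃ m, cs.length = m + 1 := ⟨cs.length - 1, by omega⟩
  rw [pvCore, hm, pvCoreGo, if_pos h, pvCoreGo_fuel m _ (by omega), pvInner]


-- a non-raising input that still contains "list" must contain a "["
theorem pv_pre_bracket {cs : List Char}
    (hl : PySem.Chars.isIn "list".toList cs = true)
    (hp : PySem.Chars.isIn "list".toList (pvCore cs) = false) :
    PySem.Chars.isIn "[".toList cs = true := by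
  by_contra hb
  rw [pvCore_stop (by simpa using hb)] at hp
  simp_all

-- B's inner slice seen through .toList is A's inner slice
theorem pv_slice_bridge (s : String) :
    (PySem.Str.slice s (some (PySem.Str.find s "[" + 1))
      (some (PySem.Str.rfind s "]"))).toList = pvInner s.toList := by
  simp [pvInner]

theorem pv_find_nonneg {s : String}
    (hb : PySem.Chars.isIn "[".toList s.toList = true) :
    0 ≤ PySem.Str.find s "[" := by
  rw [PySem.Str.find_nonneg_iff]
  simpa using (PySem.Chars.isIn_iff_infix _ _).1 hb

-- unfoldings of B's loop
theorem altPeel_stop {cur : String} (d : Nat)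
    (h : PySem.Str.isIn "list" cur = false) :
    altPeel cur d = (cur, d) := by
  rw [altPeel.eq_def]; simp_all

theorem altPeel_step {cur : String} (d : Nat)
    (hl : PySem.Str.isIn "list" cur = true)
    (hf : 0 ≤ PySem.Str.find cur "[") :
    altPeel cur d = altPeel (PySem.Str.slice cur (some (PySem.Str.find cur "[" + 1))
      (some (PySem.Str.rfind cur "]"))) (d + 1) := by
  rw [altPeel.eq_def]
  simp only [hl, if_true]
  rw [if_neg (by omega)]

-- the starting depth only shifts the counted depth
theorem altPeel_shift : ∀ (n : Nat) (cur : String), cur.toList.length ≤ n → ∀ (d : Nat),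
    altPeel cur d = ((altPeel cur 0).1, (altPeel cur 0).2 + d) := by
  intro n
  induction n with
  | zero =>
    intro cur hlen d
    have hnil : cur.toList = [] := List.eq_nil_of_length_eq_zero (by omega)
    have hl : PySem.Str.isIn "list" cur = false := by
      rw [← Bool.not_eq_true, PySem.Str.isIn_iff_infix, hnil]
      simp
    rw [altPeel_stop d hl, altPeel_stop 0 hl]; simp
  | succ n ih =>
    intro cur hlen d
    by_cases hl : PySem.Str.isIn "list" cur = true
    · by_cases hf : 0 ≤ PySem.Str.find cur "["
      · have hb : PySem.Str.isIn "[" cur = true := by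
          rw [PySem.Str.isIn_iff_infix]
          exact (PySem.Str.find_nonneg_iff _ _).1 hf
        have hlt := pv_peel_len_lt_str cur hb
        rw [altPeel_step d hl hf, altPeel_step 0 hl hf,
          ih _ (by omega) (d + 1), ih _ (by omega) 1]
        simp [Nat.add_assoc, Nat.add_comm]
      · rw [altPeel.eq_def]
        simp only [hl, if_true]
        rw [if_pos (by omega)]
        conv_rhs => rw [altPeel.eq_def]
        simp only [hl, if_true]
        rw [if_pos (by omega)]
        simp
    · have hl' : PySem.Str.isIn "list" cur = false := by simpa using hl
      rw [altPeel_stop d hl', altPeel_stop 0 hl']; simp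

theorem altRepeat_succ_r (n : Nat) :
    (altRepeat (n + 1)).toList = (altRepeat n).toList ++ "[]".toList := by
  induction n with
  | zero => simp [altRepeat]
  | succ n ih =>
    have h2 : ("[]" ++ altRepeat n).toList = (altRepeat n).toList ++ "[]".toList := by
      rw [show ("[]" ++ altRepeat n) = altRepeat (n + 1) from rfl, ih]
    rw [altRepeat.eq_def]
    simp only [String.toList_append]
    rw [ih, ← List.append_assoc]
    congr 1
    simpa using h2

-- MAIN INVARIANT: on a non-raising input containing "list", A's recursion produces the base type of
-- the peeled core decorated per B's closed form, with B's depth count at least 1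
theorem pv_key : ∀ (n : Nat) (s : String), s.toList.length ≤ n →
    PySem.Chars.isIn "list".toList s.toList = true →
    PySem.Chars.isIn "list".toList (pvCore s.toList) = false →
    1 ≤ (altPeel s 0).2 ∧
    pyAux s.toList true
      = (PySem.Dict.getD altDict (altPeel s 0).1 "").toList ++ (altRepeat (altPeel s 0).2).toList ∧
    pyAux s.toList false
      = (if (altPeel s 0).2 = 1
         then "List<".toList ++ (PySem.Dict.getD altDict (altPeel s 0).1 "").toList ++ ">".toList
         else (PySem.Dict.getD altDict (altPeel s 0).1 "").toList
              ++ (altRepeat (altPeel s 0).2).toList) := by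
  intro n
  induction n with
  | zero =>
    intro s hlen hl hp
    exfalso
    have hnil : s.toList = [] := List.eq_nil_of_length_eq_zero (by omega)
    rw [hnil] at hl
    have := (PySem.Chars.isIn_iff_infix _ _).1 hl
    simp at this
  | succ n ih =>
    intro s hlen hl hp
    have hb : PySem.Chars.isIn "[".toList s.toList = true := pv_pre_bracket hl hp
    have hf : 0 ≤ PySem.Str.find s "[" := pv_find_nonneg hb
    have hlS : PySem.Str.isIn "list" s = true := by simpa using hl
    have hIT : (PySem.Str.slice s (some (PySem.Str.find s "[" + 1))
        (some (PySem.Str.rfind s "]"))).toList = pvInner s.toList := pv_slice_bridge s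
    set innerS := PySem.Str.slice s (some (PySem.Str.find s "[" + 1))
        (some (PySem.Str.rfind s "]")) with hinnerS
    have hbS : PySem.Str.isIn "[" s = true := by simpa using hb
    have hlen' : innerS.toList.length ≤ n := by
      have hx := pv_peel_len_lt_str s hbS
      rw [← hinnerS] at hx
      omega
    have hpeel : altPeel s 0 = altPeel innerS 1 := altPeel_step 0 hlS hf
    have hcore : pvCore s.toList = pvCore (pvInner s.toList) := pvCore_step hb
    by_cases hin : PySem.Chars.isIn "list".toList (pvInner s.toList) = true
    · have hl' : PySem.Chars.isIn "list".toList innerS.toList = true := by rw [hIT]; exact hin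
      have hp' : PySem.Chars.isIn "list".toList (pvCore innerS.toList) = false := by
        rw [hIT, ← hcore]; exact hp
      obtain ⟨hk1, htrue, hfalse⟩ := ih innerS hlen' hl' hp'
      have hshift : altPeel innerS 1 = ((altPeel innerS 0).1, (altPeel innerS 0).2 + 1) :=
        altPeel_shift innerS.toList.length innerS le_rfl 1
      have hd : (altPeel s 0).2 = (altPeel innerS 0).2 + 1 := by rw [hpeel, hshift]
      have hb1 : (altPeel s 0).1 = (altPeel innerS 0).1 := by rw [hpeel, hshift]
      have hrep : (altRepeat ((altPeel innerS 0).2 + 1)).toList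
          = (altRepeat (altPeel innerS 0).2).toList ++ "[]".toList := altRepeat_succ_r _
      refine ⟨by omega, ?_, ?_⟩
      · rw [pyAux_step true hl hb, if_pos hin, ← hIT, htrue, hd, hb1, hrep]
        simp
      · rw [pyAux_step false hl hb, if_pos hin, ← hIT, htrue, hd, hb1, hrep]
        rw [if_neg (by omega)]
        simp
    · have hin' : PySem.Chars.isIn "list".toList (pvInner s.toList) = false := by simpa using hin
      have hin'' : PySem.Chars.isIn ['l', 'i', 's', 't'] (pvInner s.toList) = false := by
        simpa using hin'
      have hlinS : PySem.Str.isIn "list" innerS = false := by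
        have : PySem.Chars.isIn "list".toList innerS.toList = false := by rw [hIT]; exact hin'
        simpa using this
      have hstop : altPeel s 0 = (innerS, 1) := by rw [hpeel, altPeel_stop 1 hlinS]
      have hbase : PySem.Dict.getD pvTypesDict (pvInner s.toList) []
          = (PySem.Dict.getD altDict innerS "").toList := by
        rw [← hIT, pv_getD_bridge]
      refine ⟨by rw [hstop], ?_, ?_⟩
      · rw [pyAux_step true hl hb, if_neg (by simp [hin'']), if_pos rfl,
          pyAux_no_list true hin', hbase, hstop]
        simp [altRepeat]
      · rw [pyAux_step false hl hb, if_neg (by simp [hin'']), if_neg (by simp),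
          pyAux_no_list false hin', hbase, hstop]
        rw [if_pos rfl]

-- ===== VERDICT =====
theorem python_to_java_type_spec : Claim_equal_python_to_java_type := by
  intro s a _ hpre
  unfold Spec_python_to_java_type python_to_java_type python_to_java_type_alt
  cases hd : PySem.Dict.get? altDict s with
  | some v =>
    have hdl : PySem.Dict.get? pvTypesDict s.toList = some v.toList := by
      rw [pv_get?_bridge, hd]; rfl
    rw [pyAux.eq_def, hdl]
    simp
  | none =>
    have hdn : PySem.Dict.get? pvTypesDict s.toList = none := by
      rw [pv_get?_bridge, hd]; rfl
    by_cases hl : PySem.Str.isIn "list" s = true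
    · have hlc : PySem.Chars.isIn "list".toList s.toList = true := by simpa using hl
      obtain ⟨hk1, htrue, hfalse⟩ := pv_key s.toList.length s le_rfl hlc hpre
      simp only [hl, Bool.not_true, Bool.false_eq_true, if_false]
      cases a with
      | true =>
        rw [htrue]
        rw [if_neg (by simp)]
        apply String.toList_inj.mp
        simp
      | false =>
        rw [hfalse]
        by_cases hk : (altPeel s 0).2 = 1
        · rw [if_pos hk, if_pos (by simp [hk])]
          apply String.toList_inj.mp
          simp
        · rw [if_neg hk, if_neg (by simp [hk])]
          apply String.toList_inj.mp
          simp
    · have hl' : PySem.Str.isIn "list" s = false := by simpa using hl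
      have hlc : PySem.Chars.isIn "list".toList s.toList = false := by simpa using hl'
      have hlc' : PySem.Chars.isIn ['l', 'i', 's', 't'] s.toList = false := by simpa using hl'
      rw [pyAux_no_list a hlc, PySem.Dict.getD_eq_get?_getD, hdn]
      simp [hlc']
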